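-- pv_equiv track=rewrite | github.com/tarunparthasarathy/leetcode-problems | 01_complexity.py | intersection_points
-- ===== SOURCE A (Python) =====
-- def intersection_points(arr1, arr2):
--     result = []
--     for i in range(0, len(arr1)):
--         for j in range(0, len(arr2)):
--             if (arr1[i] == arr2[j]):
--                 points = [arr1[i], arr2[j]]
--                 result.append(points)
--     return result
-- ===== SOURCE B (Python) =====
-- def intersection_points(arr1, arr2):
--     counts = {}
--     for v in arr2:
--         counts[v] = counts.get(v, 0) + 1
--     result = []
--     for x in arr1:
--         result += [[x, x]] * counts.get(x, 0)
--     return result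
-- ===== Notes on version B (the rewrite author's own statement) =====
-- stated objective: faster
-- what changed: Replaces the nested O(n*m) scan with a one-pass count dictionary over arr2, then emits count copies of [x,x] per arr1 element; intended as faster (measured 3.68x at n=1024, the largest size both finished; unconfirmed at n=4096 where output size itself is quadratic).
import Mathlib
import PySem

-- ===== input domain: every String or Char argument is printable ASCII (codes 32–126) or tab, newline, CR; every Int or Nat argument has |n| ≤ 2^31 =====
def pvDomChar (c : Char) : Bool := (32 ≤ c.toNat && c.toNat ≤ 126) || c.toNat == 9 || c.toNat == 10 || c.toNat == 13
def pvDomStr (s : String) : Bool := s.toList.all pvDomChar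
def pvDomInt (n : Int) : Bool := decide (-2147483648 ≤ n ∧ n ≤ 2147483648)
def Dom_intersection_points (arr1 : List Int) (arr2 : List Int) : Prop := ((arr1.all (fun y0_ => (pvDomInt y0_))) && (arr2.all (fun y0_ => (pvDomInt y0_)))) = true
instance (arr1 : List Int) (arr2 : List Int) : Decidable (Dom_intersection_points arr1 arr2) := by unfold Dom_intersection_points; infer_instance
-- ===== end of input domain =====

-- B replaces A's nested quadratic scan by a count dictionary over arr2 (intended as faster; measured 3.68x at n=1024 in a timing run, unconfirmed at the largest size).

-- ===== PORT A =====
-- for i over arr1, for j over arr2, append [arr1[i], arr2[j]] on equality (same traversal order as the index loops)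
def intersection_points (arr1 : List Int) (arr2 : List Int) : List (List Int) :=
  arr1.foldl (fun result a =>
    arr2.foldl (fun result b =>
      if a == b then result ++ [[a, b]] else result) result) []

-- ===== PORT B =====
-- counts = one-pass dict of arr2 multiplicities; then per x in arr1 append count copies of [x, x]
def intersection_points_alt (arr1 : List Int) (arr2 : List Int) : List (List Int) :=
  let counts := arr2.foldl (fun d v => d.insert v (d.getD v 0 + 1)) (PySem.Dict.empty : PySem.Dict Int Int)
  arr1.foldl (fun result x => result ++ List.replicate (counts.getD x 0).toNat [x, x]) []

-- ===== PRECONDITION & SPEC =====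
def Spec_intersection_points (arr1 : List Int) (arr2 : List Int) (out : List (List Int)) : Prop := out = intersection_points_alt arr1 arr2
instance (arr1 : List Int) (arr2 : List Int) (out : List (List Int)) : Decidable (Spec_intersection_points arr1 arr2 out) := by unfold Spec_intersection_points; infer_instance

-- ===== CLAIM (what is proved, stated in full; the proofs are below) =====
def Claim_equal_intersection_points : Prop := ∀ (arr1 : List Int) (arr2 : List Int), Dom_intersection_points arr1 arr2 → Spec_intersection_points arr1 arr2 (intersection_points arr1 arr2)

-- ===== LEMMAS AND PROOFS =====

-- A's inner loop over arr2 for a fixed a appends exactly (arr2.count a) copies of [a, a]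
lemma inner_loop_eq (a : Int) (arr2 : List Int) (res : List (List Int)) :
    arr2.foldl (fun result b => if a == b then result ++ [[a, b]] else result) res
      = res ++ List.replicate (arr2.count a) [a, a] := by
  induction arr2 generalizing res with
  | nil => simp
  | cons b t ih =>
    simp only [List.foldl_cons]
    by_cases h : a = b
    · subst h
      rw [if_pos (by simp), ih]
      simp [List.replicate_succ]
    · rw [if_neg (by simp [h]), ih]
      simp [Ne.symm h]

-- the counter dictionary looks up exactly the multiplicity in arr2
lemma counts_eq (arr2 : List Int) (x : Int) :
    ((arr2.foldl (fun d v => d.insert v (d.getD v 0 + 1)) (PySem.Dict.empty : PySem.Dict Int Int)).getD x 0).toNat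
      = arr2.count x := by
  rw [PySem.Dict.getD_foldl_insert_add_one]
  simp

lemma outer_eq (arr1 arr2 : List Int) (res : List (List Int)) :
    arr1.foldl (fun result a =>
        arr2.foldl (fun result b => if a == b then result ++ [[a, b]] else result) result) res
      = arr1.foldl (fun result x =>
          result ++ List.replicate
            (((arr2.foldl (fun d v => d.insert v (d.getD v 0 + 1)) (PySem.Dict.empty : PySem.Dict Int Int)).getD x 0).toNat)
            [x, x]) res := by
  induction arr1 generalizing res with
  | nil => rfl
  | cons a t ih =>
    simp only [List.foldl_cons, inner_loop_eq, counts_eq]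

-- ===== VERDICT (by name: the statement is the Claim_ definition above) =====
theorem intersection_points_spec : Claim_equal_intersection_points := by
  intro arr1 arr2 _
  unfold Spec_intersection_points intersection_points intersection_points_alt
  exact outer_eq arr1 arr2 []
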